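-- pv_equiv track=rewrite | github.com/fuh-Q/gdkore | utils/formatting.py | all_casings
-- ===== SOURCE A (Python) =====
-- from typing import Callable, Generator, List, overload, TYPE_CHECKING
--
-- def all_casings(input_string: str) -> Generator[str, None, None]:
--     """
--     A generator that yields every combination of lowercase and uppercase in a given string.
--
--     Arguments
--     ---------
--     input_string: `str`
--         The string to iterate through.
--
--     Returns
--     -------
--     all_casings: Generator[`str`]
--         A generator object yielding every combination of lowercase and uppercase.
--     """
--     if not input_string:
--         yield ""
--     else:
--         first = input_string[:1]
--         if first.lower() == first.upper():
--             for sub_casing in all_casings(input_string[1:]):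
--                 yield first + sub_casing
--         else:
--             for sub_casing in all_casings(input_string[1:]):
--                 yield first.lower() + sub_casing
--                 yield first.upper() + sub_casing
-- ===== SOURCE B (Python) =====
-- def all_casings(input_string: str):
--     """Iterative: build all casings back-to-front with one list accumulator."""
--     results = [""]
--     for c in reversed(input_string):
--         variants = [c] if c.lower() == c.upper() else [c.lower(), c.upper()]
--         results = [v + r for r in results for v in variants]
--     yield from results
-- ===== Notes on version B (the rewrite author's own statement) =====
-- stated objective: alternative
-- what changed: Replaces A's recursive generator (recurse on the tail, prepend the head's case variants to each sub-casing) with an iterative single-accumulator build: fold over the string in reverse, expanding a result list by each character's case variants.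
import Mathlib
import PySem

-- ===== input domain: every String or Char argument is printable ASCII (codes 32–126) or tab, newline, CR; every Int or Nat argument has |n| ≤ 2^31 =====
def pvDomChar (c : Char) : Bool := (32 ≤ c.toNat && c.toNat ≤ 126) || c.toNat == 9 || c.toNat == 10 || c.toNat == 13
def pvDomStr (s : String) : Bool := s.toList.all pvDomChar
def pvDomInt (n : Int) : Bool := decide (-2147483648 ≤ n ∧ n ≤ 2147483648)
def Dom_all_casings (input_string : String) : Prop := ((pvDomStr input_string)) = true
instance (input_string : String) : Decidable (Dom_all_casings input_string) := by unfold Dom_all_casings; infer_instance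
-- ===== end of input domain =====

-- B replaces A's recursive generator with an iterative back-to-front accumulator build (alternative decomposition, same output).

-- ===== PORT A =====
-- A over List Char: first = s[:1]; for a printable-ASCII 1-char string, first.lower()==first.upper()
-- is exactly lowerChar c = upperChar c (exact on the stated ASCII domain).
def aCasings : List Char → List (List Char)
  | [] => [[]]
  | c :: rest =>
    if PySem.Chars.lowerChar c = PySem.Chars.upperChar c then
      (aCasings rest).map (fun sub => c :: sub)
    else
      (aCasings rest).flatMap (fun sub =>
        [PySem.Chars.lowerChar c :: sub, PySem.Chars.upperChar c :: sub])

def all_casings (input_string : String) : List String :=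
  (aCasings input_string.toList).map String.ofList

-- ===== PORT B =====
def bVariants (c : Char) : List Char :=
  if PySem.Chars.lowerChar c = PySem.Chars.upperChar c then [c]
  else [PySem.Chars.lowerChar c, PySem.Chars.upperChar c]

def all_casings_alt (input_string : String) : List String :=
  ((input_string.toList.reverse.foldl
      (fun acc c => acc.flatMap (fun r => (bVariants c).map (fun v => v :: r)))
      [[]]).map String.ofList)

-- ===== PRECONDITION & SPEC =====
def Spec_all_casings (input_string : String) (out : List String) : Prop := out = all_casings_alt input_string
instance (input_string : String) (out : List String) : Decidable (Spec_all_casings input_string out) := by unfold Spec_all_casings; infer_instance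

-- ===== CLAIM (what is proved, stated in full; the proofs are below) =====
def Claim_equal_all_casings : Prop := ∀ (input_string : String), Dom_all_casings input_string → Spec_all_casings input_string (all_casings input_string)

-- ===== LEMMAS AND PROOFS =====

-- ===== VERDICT (by name: the statement is the Claim_ definition above) =====
theorem bFoldr_eq_aCasings (l : List Char) :
    l.foldr (fun c acc => acc.flatMap (fun r => (bVariants c).map (fun v => v :: r))) [[]]
      = aCasings l := by
  induction l with
  | nil => rfl
  | cons c rest ih =>
    rw [List.foldr_cons, ih]
    simp only [aCasings, bVariants]
    split
    · induction aCasings rest with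
      | nil => rfl
      | cons h t iht => simpa [List.flatMap] using iht
    · rfl

theorem all_casings_spec : Claim_equal_all_casings := by
  intro s _
  unfold Spec_all_casings all_casings all_casings_alt
  rw [List.foldl_reverse, bFoldr_eq_aCasings]
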